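-- pv_equiv track=rewrite | github.com/Valdecy/pyAutoSummarizer | pyAutoSummarizer/base/psr.py | match_tokens
-- ===== SOURCE A (Python) =====
-- def match_tokens(gen_tokens, ref_tokens):
--     matches  = 0
--     ref_dict = {}
--     for token in ref_tokens:
--         if (token in ref_dict):
--             ref_dict[token] = ref_dict[token] + 1
--         else:
--             ref_dict[token] = 1
--     for token in gen_tokens:
--         if (token in ref_dict and ref_dict[token] > 0):
--             matches         = matches + 1
--             ref_dict[token] = ref_dict[token] - 1
--     return matches
-- ===== SOURCE B (Python) =====
-- def match_tokens(gen_tokens, ref_tokens):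
--     return sum(min(gen_tokens.count(t), ref_tokens.count(t)) for t in dict.fromkeys(gen_tokens))
-- ===== Notes on version B (the rewrite author's own statement) =====
-- stated objective: simpler
-- what changed: Replaced A's two-pass build-then-decrement dict loops by a one-line sum of min(gen count, ref count) over the distinct generated tokens (multiset intersection by counts).
import Mathlib
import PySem

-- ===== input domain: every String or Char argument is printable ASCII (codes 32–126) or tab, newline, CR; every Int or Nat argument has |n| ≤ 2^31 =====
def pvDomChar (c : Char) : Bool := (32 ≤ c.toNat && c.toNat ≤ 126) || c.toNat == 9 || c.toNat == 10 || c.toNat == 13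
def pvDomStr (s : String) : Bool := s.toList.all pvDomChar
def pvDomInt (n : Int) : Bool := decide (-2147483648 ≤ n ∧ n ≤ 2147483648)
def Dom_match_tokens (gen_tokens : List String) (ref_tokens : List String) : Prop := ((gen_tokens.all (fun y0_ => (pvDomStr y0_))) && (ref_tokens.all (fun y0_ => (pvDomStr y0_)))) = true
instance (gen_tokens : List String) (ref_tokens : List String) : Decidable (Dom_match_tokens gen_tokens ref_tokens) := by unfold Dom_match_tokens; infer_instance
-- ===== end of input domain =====

-- B replaces A's build-then-decrement dict passes by a direct sum of per-token minimum counts over the distinct generated tokens (simpler, not faster).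

-- ===== PORT A =====
def match_tokens (gen_tokens : List String) (ref_tokens : List String) : Int :=
  let ref_dict : PySem.Dict String Int := ref_tokens.foldl
    (fun d token =>
      if d.contains token then d.insert token (d.getD token 0 + 1)
      else d.insert token 1)
    PySem.Dict.empty
  (gen_tokens.foldl
    (fun p token =>
      if p.2.contains token && decide (0 < p.2.getD token 0) then
        (p.1 + 1, p.2.insert token (p.2.getD token 0 - 1))
      else p)
    ((0 : Int), ref_dict)).1

-- ===== PORT B =====
def match_tokens_alt (gen_tokens : List String) (ref_tokens : List String) : Int :=
  ((PySem.List.dedup gen_tokens).map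
    (fun t => min ((gen_tokens.count t : Int)) ((ref_tokens.count t : Int)))).sum

-- ===== PRECONDITION & SPEC =====
def Spec_match_tokens (gen_tokens : List String) (ref_tokens : List String) (out : Int) : Prop := out = match_tokens_alt gen_tokens ref_tokens
instance (gen_tokens : List String) (ref_tokens : List String) (out : Int) : Decidable (Spec_match_tokens gen_tokens ref_tokens out) := by unfold Spec_match_tokens; infer_instance

-- ===== CLAIM (what is proved, stated in full; the proofs are below) =====
def Claim_equal_match_tokens : Prop := ∀ (gen_tokens : List String) (ref_tokens : List String), Dom_match_tokens gen_tokens ref_tokens → Spec_match_tokens gen_tokens ref_tokens (match_tokens gen_tokens ref_tokens)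

-- ===== LEMMAS AND PROOFS =====

-- A's first loop builds Counter(ref_tokens): every lookup is the count in ref_tokens.
lemma buildRef_getD (ref_tokens : List String) (k : String) :
    (ref_tokens.foldl
      (fun d token =>
        if d.contains token then d.insert token (d.getD token 0 + 1)
        else d.insert token 1)
      PySem.Dict.empty).getD k 0 = (ref_tokens.count k : Int) := by
  have hfun : (fun (d : PySem.Dict String Int) token =>
        if d.contains token then d.insert token (d.getD token 0 + 1)
        else d.insert token 1)
      = fun d token => d.insert token (d.getD token 0 + 1) := by
    funext d token
    by_cases h : d.contains token = true
    · simp [h]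
    · simp only [Bool.not_eq_true] at h
      simp [h, PySem.Dict.getD_of_not_contains _ _ h]
  rw [hfun, PySem.Dict.getD_foldl_insert_add_one]
  simp

-- Splitting a sum over a duplicate-free list into the term at t (if present) and the rest.
lemma sum_map_discard (g : String → Int) (l : List String) (hnd : l.Nodup) (t : String) :
    (l.map g).sum = (if t ∈ l then g t else 0) + ((PySem.Set.discard l t).map g).sum := by
  induction l with
  | nil => simp [PySem.Set.discard]
  | cons x xs ih =>
    simp only [List.nodup_cons] at hnd
    by_cases hx : x = t
    · subst hx
      have : PySem.Set.discard (x :: xs) x = xs := by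
        simp [PySem.Set.discard]
        intro a ha
        simp [show a ≠ x from fun he => hnd.1 (he ▸ ha)]
      simp [this, hnd.1]
    · have : PySem.Set.discard (x :: xs) t = x :: PySem.Set.discard xs t := by
        simp [PySem.Set.discard, hx]
      rw [this]
      simp only [List.map_cons, List.sum_cons, ih hnd.2]
      by_cases ht : t ∈ xs
      · simp [ht]; ring
      · simp [ht]; intro he; exact absurd he.symm hx

-- Invariant of A's second loop: with a nonnegative count table d it adds Σ_{t ∈ distinct gen} min(gen.count t, d[t]).
lemma loop_eq (gen : List String) : ∀ (d : PySem.Dict String Int) (m : Int),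
    (∀ k, 0 ≤ d.getD k 0) →
    (gen.foldl
      (fun p token =>
        if p.2.contains token && decide (0 < p.2.getD token 0) then
          (p.1 + 1, p.2.insert token (p.2.getD token 0 - 1))
        else p)
      (m, d)).1
      = m + ((PySem.List.dedup gen).map (fun t => min ((gen.count t : Int)) (d.getD t 0))).sum := by
  induction gen with
  | nil => intro d m _; simp
  | cons t rest ih =>
    intro d m hnn
    rw [List.foldl_cons]
    by_cases hpos : 0 < d.getD t 0
    · have hc : d.contains t = true := by
        by_contra hc
        rw [Bool.not_eq_true] at hc
        rw [PySem.Dict.getD_of_not_contains _ _ hc] at hpos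
        omega
      rw [show (if d.contains t && decide (0 < d.getD t 0) then
            (m + 1, d.insert t (d.getD t 0 - 1)) else (m, d)) = (m + 1, d.insert t (d.getD t 0 - 1)) by
          simp [hc, hpos]]
      rw [ih _ _ (by
        intro k
        rw [PySem.Dict.getD_insert]
        split_ifs with hk
        · omega
        · exact hnn k)]
      rw [sum_map_discard (fun k => min ((rest.count k : Int)) ((d.insert t (d.getD t 0 - 1)).getD k 0)) (PySem.List.dedup rest) (PySem.List.nodup_dedup _) t]
      have hmap : ((PySem.Set.discard (PySem.List.dedup rest) t).map
            (fun k => min ((rest.count k : Int)) ((d.insert t (d.getD t 0 - 1)).getD k 0)))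
          = ((PySem.Set.discard (PySem.List.dedup rest) t).map
            (fun k => min (((t :: rest).count k : Int)) (d.getD k 0))) := by
        apply List.map_congr_left
        intro k hk
        have hkt : k ≠ t := ((PySem.Set.mem_discard _ _ _).mp hk).2
        rw [PySem.Dict.getD_insert, List.count_cons]
        simp [hkt, Ne.symm hkt]
      rw [hmap]
      have hdedup : PySem.List.dedup (t :: rest) = t :: PySem.Set.discard (PySem.List.dedup rest) t := by
        simp [PySem.List.dedup_eq_ofList, PySem.Set.ofList_cons]
      rw [hdedup, List.map_cons, List.sum_cons]
      have hgt : (PySem.Dict.getD (d.insert t (d.getD t 0 - 1)) t 0) = d.getD t 0 - 1 := by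
        rw [PySem.Dict.getD_insert]; simp
      by_cases ht : t ∈ PySem.List.dedup rest
      · simp only [ht, if_pos, hgt, List.count_cons_self]
        push_cast
        omega
      · have htr : t ∉ rest := fun h => ht ((PySem.List.mem_dedup _ _).mpr h)
        simp only [ht, hgt, List.count_cons_self, List.count_eq_zero_of_not_mem htr, if_false]
        push_cast
        omega
    · have hdt : d.getD t 0 = 0 := le_antisymm (by omega) (hnn t)
      rw [show (if d.contains t && decide (0 < d.getD t 0) then
            (m + 1, d.insert t (d.getD t 0 - 1)) else (m, d)) = (m, d) by simp [hpos]]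
      rw [ih _ _ hnn]
      rw [sum_map_discard (fun k => min ((rest.count k : Int)) (d.getD k 0)) (PySem.List.dedup rest) (PySem.List.nodup_dedup _) t]
      have hmap : ((PySem.Set.discard (PySem.List.dedup rest) t).map
            (fun k => min ((rest.count k : Int)) (d.getD k 0)))
          = ((PySem.Set.discard (PySem.List.dedup rest) t).map
            (fun k => min (((t :: rest).count k : Int)) (d.getD k 0))) := by
        apply List.map_congr_left
        intro k hk
        have hkt : k ≠ t := ((PySem.Set.mem_discard _ _ _).mp hk).2
        rw [List.count_cons]
        simp [Ne.symm hkt]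
      rw [hmap]
      have hdedup : PySem.List.dedup (t :: rest) = t :: PySem.Set.discard (PySem.List.dedup rest) t := by
        simp [PySem.List.dedup_eq_ofList, PySem.Set.ofList_cons]
      rw [hdedup, List.map_cons, List.sum_cons]
      by_cases ht : t ∈ PySem.List.dedup rest
      · simp only [ht, if_pos, hdt, List.count_cons_self]
        have : (0:Int) ≤ (rest.count t : Int) := by positivity
        omega
      · have htr : t ∉ rest := fun h => ht ((PySem.List.mem_dedup _ _).mpr h)
        simp only [ht, hdt, List.count_cons_self, List.count_eq_zero_of_not_mem htr, if_false]
        omega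

-- ===== VERDICT (by name: the statement is the Claim_ definition above) =====
theorem match_tokens_spec : Claim_equal_match_tokens := by
  intro gen ref _
  show match_tokens gen ref = match_tokens_alt gen ref
  unfold match_tokens match_tokens_alt
  rw [loop_eq gen _ 0 (by intro k; rw [buildRef_getD]; positivity)]
  simp [buildRef_getD]
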